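-- pv_equiv track=rewrite | github.com/LoreDoe/Algoritimo-de-Huffman-em-Python | main.py | compactar_ascii
-- ===== SOURCE A (Python) =====
-- def contar_frequencia(texto):
--   freq_mapa = {}
--   for caractere in texto:
--     if caractere in freq_mapa:
--       freq_mapa[caractere] += 1
--     else:
--       freq_mapa[caractere] = 1
--
--   return freq_mapa
--
-- def compactar_ascii(texto):
--   freq_mapa = contar_frequencia(texto)
--   tabela_mapeamento = {}
--
--   for caractere in freq_mapa:
--     codigo_binario = bin(ord(caractere))[2:].zfill(8)
--     tabela_mapeamento[caractere] = (freq_mapa[caractere], codigo_binario)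
--
--   texto_compactado = ''
--   for caractere in texto:
--     texto_compactado += tabela_mapeamento[caractere][1]
--
--   return texto_compactado, tabela_mapeamento
-- ===== SOURCE B (Python) =====
-- def compactar_ascii(texto):
--   tabela_mapeamento = {}
--   partes = []
--   for caractere in texto:
--     entrada = tabela_mapeamento.get(caractere)
--     if entrada is None:
--       codigo = bin(ord(caractere))[2:].zfill(8)
--       tabela_mapeamento[caractere] = (1, codigo)
--     else:
--       codigo = entrada[1]
--       tabela_mapeamento[caractere] = (entrada[0] + 1, codigo)
--     partes.append(codigo)
--   return ''.join(partes), tabela_mapeamento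
-- ===== Notes on version B (the rewrite author's own statement) =====
-- stated objective: alternative
-- what changed: Replaced A's three passes (count frequencies into a dict, build the (freq, code) table from the frequency dict, then re-scan the text concatenating codes by +=) by a single pass that maintains the (freq, code) table and a list of code pieces simultaneously and joins the pieces at the end.
import Mathlib
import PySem

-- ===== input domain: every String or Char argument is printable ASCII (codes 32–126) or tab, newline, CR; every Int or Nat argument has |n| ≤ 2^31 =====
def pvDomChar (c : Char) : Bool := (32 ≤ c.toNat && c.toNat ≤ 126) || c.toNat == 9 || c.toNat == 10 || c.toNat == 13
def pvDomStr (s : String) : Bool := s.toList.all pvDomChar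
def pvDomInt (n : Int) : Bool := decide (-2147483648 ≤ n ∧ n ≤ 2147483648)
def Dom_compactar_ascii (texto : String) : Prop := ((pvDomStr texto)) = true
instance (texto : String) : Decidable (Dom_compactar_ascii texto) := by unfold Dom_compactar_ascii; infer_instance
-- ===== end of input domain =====

-- B fuses A's three passes (frequency count, table build, re-scan concatenation) into one pass that
-- maintains the (freq, code) table and a list of code pieces, joined at the end; same return value.

-- hand port of bin(n)[2:] for n ≥ 1: most-significant-first binary digits (exact for positive n)
def pvBinDigits : Nat → List Char
  | 0 => []
  | n + 1 => pvBinDigits ((n + 1) / 2) ++ [if (n + 1) % 2 = 1 then '1' else '0']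

-- bin(ord(c))[2:].zfill(8)  (bin(0)[2:] = "0"; exact for ord(c) ≥ 0)
def pvCodigo (c : Char) : String :=
  PySem.Str.zfill (String.ofList (if c.toNat = 0 then ['0'] else pvBinDigits c.toNat)) 8

-- ===== PORT A =====
def compactar_ascii (texto : String) : String × (List (String × Int × String)) :=
  -- contar_frequencia: freq_mapa[c] += 1 if present else = 1
  let freq_mapa : PySem.Dict Char Int :=
    texto.toList.foldl
      (fun d c => if d.contains c then d.insert c (d.getD c 0 + 1) else d.insert c 1)
      PySem.Dict.empty
  -- for caractere in freq_mapa: tabela[c] = (freq_mapa[c], bin(ord(c))[2:].zfill(8))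
  let tabela : PySem.Dict Char (Int × String) :=
    freq_mapa.keys.foldl (fun t c => t.insert c (freq_mapa.getD c 0, pvCodigo c)) PySem.Dict.empty
  -- texto_compactado += tabela[c][1]  (default unreachable: every c of texto is a key)
  let compactado : String :=
    texto.toList.foldl (fun acc c => acc ++ (tabela.getD c (0, "")).2) ""
  (compactado, tabela.items.map (fun p => (String.ofList [p.1], p.2)))

-- ===== PORT B =====
def pvStepB (st : PySem.Dict Char (Int × String) × List String) (c : Char) :
    PySem.Dict Char (Int × String) × List String :=
  match st.1.get? c with
  | none =>
      let code := pvCodigo c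
      (st.1.insert c (1, code), st.2 ++ [code])
  | some e => (st.1.insert c (e.1 + 1, e.2), st.2 ++ [e.2])

def compactar_ascii_alt (texto : String) : String × (List (String × Int × String)) :=
  let st := texto.toList.foldl pvStepB (PySem.Dict.empty, [])
  (PySem.Str.join "" st.2, st.1.items.map (fun p => (String.ofList [p.1], p.2)))

-- ===== PRECONDITION & SPEC =====
def Spec_compactar_ascii (texto : String) (out : String × (List (String × Int × String))) : Prop := out = compactar_ascii_alt texto
instance (texto : String) (out : String × (List (String × Int × String))) : Decidable (Spec_compactar_ascii texto out) := by unfold Spec_compactar_ascii; infer_instance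

-- ===== CLAIM (what is proved, stated in full; the proofs are below) =====
def Claim_equal_compactar_ascii : Prop := ∀ (texto : String), Dom_compactar_ascii texto → Spec_compactar_ascii texto (compactar_ascii texto)

-- ===== LEMMAS AND PROOFS =====

-- A's frequency fold is Counter(texto)
lemma pvFreqA_eq_counter (l : List Char) :
    l.foldl (fun d c => if d.contains c then d.insert c (d.getD c 0 + 1) else d.insert c 1)
      PySem.Dict.empty = PySem.Dict.counter l := by
  have h : (fun (d : PySem.Dict Char Int) c =>
      if d.contains c then d.insert c (d.getD c 0 + 1) else d.insert c 1)
      = fun d c => d.insert c (d.getD c 0 + 1) := by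
    funext d c
    by_cases h : d.contains c
    · simp [h]
    · simp only [Bool.not_eq_true] at h
      simp [h, PySem.Dict.getD_of_not_contains _ _ h]
  rw [h, PySem.Dict.foldl_insert_getD_add_one_eq_counter]

-- A's table, as an items list
lemma pvTabelaA_items (l : List Char) :
    ((PySem.Dict.counter l).keys.foldl
        (fun t c => t.insert c ((PySem.Dict.counter l).getD c 0, pvCodigo c))
        PySem.Dict.empty).items
      = (PySem.Set.ofList l).map (fun c => (c, ((l.count c : Int), pvCodigo c))) := by
  have h := PySem.Dict.items_foldl_insert_fresh
      (l := (PySem.Dict.counter l).keys) (k := fun c => c)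
      (v := fun c => ((PySem.Dict.counter l).getD c 0, pvCodigo c)) (d := PySem.Dict.empty)
      (by intro a _; simp [PySem.Dict.contains_empty])
      (by simpa using PySem.Dict.nodup_keys_counter l)
  simpa [PySem.Dict.keys_counter, PySem.Dict.getD_counter] using h

lemma pvOfList_append_singleton (l : List Char) (c : Char) :
    PySem.Set.ofList (l ++ [c])
      = if c ∈ l then PySem.Set.ofList l else PySem.Set.ofList l ++ [c] := by
  rw [PySem.Set.ofList_append]
  by_cases h : c ∈ l
  · simp [PySem.Set.update, PySem.Set.add, List.contains_iff_mem,
      (PySem.Set.mem_ofList l c).mpr h, h]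
  · simp [PySem.Set.update, PySem.Set.add, List.contains_iff_mem, h,
      fun hc => h ((PySem.Set.mem_ofList l c).mp hc)]

-- B's fold invariant: the table is A's table, the pieces are the per-character codes
lemma pvBfold (l : List Char) :
    (l.foldl pvStepB (PySem.Dict.empty, [])).1.items
        = (PySem.Set.ofList l).map (fun c => (c, ((l.count c : Int), pvCodigo c)))
    ∧ (l.foldl pvStepB (PySem.Dict.empty, [])).2 = l.map pvCodigo := by
  induction l using List.reverseRecOn with
  | nil => constructor <;> rfl
  | append_singleton l c ih =>
    obtain ⟨hd, hp⟩ := ih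
    rw [List.foldl_append, List.foldl_cons, List.foldl_nil]
    generalize hst : l.foldl pvStepB (PySem.Dict.empty, []) = st at hd hp ⊢
    have hkeys : st.1.keys = PySem.Set.ofList l := by
      simp [PySem.Dict.keys, hd, List.map_map, Function.comp_def]
    have hnodup : st.1.keys.Nodup := by rw [hkeys]; exact PySem.Set.nodup_ofList l
    by_cases hc : c ∈ l
    · -- c seen before: lookup returns (count, code); in-place overwrite
      have hget : st.1.get? c = some ((l.count c : Int), pvCodigo c) := by
        apply PySem.Dict.get?_of_mem_items _ _ hnodup
        rw [hd]
        exact List.mem_map.mpr ⟨c, (PySem.Set.mem_ofList l c).mpr hc, rfl⟩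
      have hcont : st.1.contains c = true :=
        (PySem.Dict.contains_iff_mem_keys _ _).mpr (by
          rw [hkeys]; exact (PySem.Set.mem_ofList l c).mpr hc)
      simp only [pvStepB, hget]
      constructor
      · rw [PySem.Dict.items_insert_of_contains _ _ hcont, hd,
          pvOfList_append_singleton, if_pos hc, List.map_map]
        apply List.map_congr_left
        intro x hx
        by_cases hxc : x = c
        · subst hxc
          simp [List.count_append]
        · have : (x == c) = false := by simp [hxc]
          simp [this, hxc, Ne.symm hxc, List.count_append, List.count_singleton,
            Function.comp]
      · rw [hp]; simp
    · -- first sight of c: fresh insert appends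
      have hget : st.1.get? c = none := by
        rw [PySem.Dict.get?_eq_none_iff_not_mem_keys, hkeys]
        exact fun h => hc ((PySem.Set.mem_ofList l c).mp h)
      have hcont : st.1.contains c = false := by
        rw [← Bool.not_eq_true, PySem.Dict.contains_iff_mem_keys, hkeys]
        exact fun h => hc ((PySem.Set.mem_ofList l c).mp h)
      simp only [pvStepB, hget]
      constructor
      · rw [PySem.Dict.items_insert_of_not_contains _ _ hcont, hd,
          pvOfList_append_singleton, if_neg hc, List.map_append]
        congr 1
        · apply List.map_congr_left
          intro x hx
          have hxl : x ∈ l := (PySem.Set.mem_ofList l x).mp hx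
          have hxc : x ≠ c := fun h => hc (h ▸ hxl)
          simp [List.count_append, List.count_singleton, hxc, Ne.symm hxc]
        · simp [List.count_append, List.count_eq_zero_of_not_mem hc]
      · rw [hp]; simp

-- string-concatenation fold, on the character level
lemma pvStrFold (l : List Char) (g : Char → String) (init : String) :
    (l.foldl (fun acc c => acc ++ g c) init).toList
      = init.toList ++ (l.map (fun c => (g c).toList)).flatten := by
  induction l generalizing init with
  | nil => simp
  | cons x xs ih => simp [ih, String.toList_append]

lemma pvFlatten_intersperse_nil (xs : List (List Char)) :
    (List.intersperse ([] : List Char) xs).flatten = xs.flatten := by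
  induction xs with
  | nil => rfl
  | cons x xs ih => cases xs <;> simp_all [List.intersperse]

-- ===== VERDICT (by name: the statement is the Claim_ definition above) =====
theorem compactar_ascii_spec : Claim_equal_compactar_ascii := by
  intro texto _
  unfold Spec_compactar_ascii
  obtain ⟨hd, hp⟩ := pvBfold texto.toList
  have htab := pvTabelaA_items texto.toList
  simp only [compactar_ascii, compactar_ascii_alt, pvFreqA_eq_counter]
  generalize hT : (PySem.Dict.counter texto.toList).keys.foldl
      (fun t c => t.insert c ((PySem.Dict.counter texto.toList).getD c 0, pvCodigo c))
      PySem.Dict.empty = tabela at htab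
  generalize hS : texto.toList.foldl pvStepB (PySem.Dict.empty, []) = st at hd hp
  have hnodup : tabela.keys.Nodup := by
    simp [PySem.Dict.keys, htab, List.map_map, Function.comp_def,
      PySem.Set.nodup_ofList]
  refine Prod.ext ?_ ?_
  · -- compacted strings agree
    apply String.toList_inj.mp
    rw [pvStrFold]
    have hjoin : (PySem.Str.join "" st.2).toList
        = (texto.toList.map (fun c => (pvCodigo c).toList)).flatten := by
      simp only [PySem.Str.join, PySem.Chars.join, List.intercalate,
        String.toList_ofList, hp]
      rw [show ("" : String).toList = [] from rfl, pvFlatten_intersperse_nil,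
        List.map_map]
      rfl
    rw [hjoin, show (("" : String)).toList = [] from rfl, List.nil_append]
    refine congrArg List.flatten (List.map_congr_left ?_)
    intro c hcl
    have hgd : tabela.getD c (0, "") = ((texto.toList.count c : Int), pvCodigo c) := by
      apply PySem.Dict.getD_of_mem_items _ _ hnodup
      rw [htab]
      exact List.mem_map.mpr ⟨c, (PySem.Set.mem_ofList _ c).mpr hcl, rfl⟩
    rw [hgd]
  · -- tables agree
    rw [htab, hd]
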